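-- pv_equiv track=rewrite | github.com/chenghui03/denove-BI-algorithm | modules/align.py | get_gap_score_x
-- ===== SOURCE A (Python) =====
-- def get_gap_score_x(prior_distance: str, gap: int) -> int:
--     """get sum of gap score of x nums of chars"""
--     gap_n = 0
--     for i in range(len(prior_distance)):
--         for j in range(i+1, len(prior_distance)):
--             if any(x == "0" for x in [prior_distance[i],
--                                       prior_distance[j]]):
--                 gap_n +=1
--
--     return gap_n * gap
-- ===== SOURCE B (Python) =====
-- def get_gap_score_x(prior_distance: str, gap: int) -> int:
--     """get sum of gap score of x nums of chars (closed form: total pairs minus zero-free pairs)"""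
--     n = len(prior_distance)
--     z = sum(1 for c in prior_distance if c == "0")
--     m = n - z
--     return (n * (n - 1) // 2 - m * (m - 1) // 2) * gap
-- ===== Notes on version B (the rewrite author's own statement) =====
-- stated objective: faster
-- what changed: Replaces the O(n^2) double loop over index pairs by one pass counting the '0' characters and the closed form C(n,2) - C(n-z,2) pairs times gap.
import Mathlib
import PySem

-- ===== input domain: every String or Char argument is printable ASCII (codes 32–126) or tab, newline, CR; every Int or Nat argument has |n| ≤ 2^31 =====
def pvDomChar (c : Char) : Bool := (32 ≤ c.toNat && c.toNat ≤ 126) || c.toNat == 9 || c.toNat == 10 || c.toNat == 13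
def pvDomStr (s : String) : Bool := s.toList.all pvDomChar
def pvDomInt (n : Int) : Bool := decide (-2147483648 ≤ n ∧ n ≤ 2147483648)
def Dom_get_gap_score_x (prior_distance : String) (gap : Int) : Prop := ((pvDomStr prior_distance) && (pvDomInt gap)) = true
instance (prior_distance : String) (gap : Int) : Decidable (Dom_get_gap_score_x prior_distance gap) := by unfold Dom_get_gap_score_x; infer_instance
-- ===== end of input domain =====

-- B replaces A's double index loop by counting the '0' characters once and a closed form; return values proved equal.

-- ===== PORT A =====
-- prior_distance[i]/[j] are always in range here (0 ≤ i < j < len), so pyGetD is exact.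
def get_gap_score_x (prior_distance : String) (gap : Int) : Int :=
  let cs := prior_distance.toList
  let gap_n : Int :=
    (PySem.List.pyRange 0 (PySem.Str.len prior_distance) 1).foldl (fun acc i =>
      (PySem.List.pyRange (i + 1) (PySem.Str.len prior_distance) 1).foldl (fun acc2 j =>
        if [PySem.List.pyGetD cs i ' ', PySem.List.pyGetD cs j ' '].any (fun x => x == '0')
        then acc2 + 1 else acc2) acc) 0
  gap_n * gap

-- ===== PORT B =====
def get_gap_score_x_alt (prior_distance : String) (gap : Int) : Int :=
  let n : Int := PySem.Str.len prior_distance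
  let z : Int := (prior_distance.toList.countP (fun c => c == '0') : Nat)
  let m : Int := n - z
  (PySem.Int.floordiv (n * (n - 1)) 2 - PySem.Int.floordiv (m * (m - 1)) 2) * gap

-- ===== PRECONDITION & SPEC =====
def Spec_get_gap_score_x (prior_distance : String) (gap : Int) (out : Int) : Prop := out = get_gap_score_x_alt prior_distance gap
instance (prior_distance : String) (gap : Int) (out : Int) : Decidable (Spec_get_gap_score_x prior_distance gap out) := by unfold Spec_get_gap_score_x; infer_instance

-- ===== CLAIM (what is proved, stated in full; the proofs are below) =====
def Claim_equal_get_gap_score_x : Prop := ∀ (prior_distance : String) (gap : Int), Dom_get_gap_score_x prior_distance gap → Spec_get_gap_score_x prior_distance gap (get_gap_score_x prior_distance gap)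

-- ===== LEMMAS AND PROOFS =====

-- A's pair count, structurally: pairs (i,j) with i < j and a '0' at i or at j
def pvPairCount : List Char → Int
  | [] => 0
  | c :: t => (if c = '0' then (t.length : Int) else (t.countP (fun x => x == '0') : Nat)) + pvPairCount t

-- the inner j-loop's count, as a function of the suffix after position i
lemma pv_inner (cs : List Char) (i : Int) (hi : 0 ≤ i) :
    ((PySem.List.pyRange (i + 1) (PySem.List.len cs) 1).countP (fun j =>
      [PySem.List.pyGetD cs i ' ', PySem.List.pyGetD cs j ' '].any (fun x => x == '0')) : Int)
    = if PySem.List.pyGetD cs i ' ' = '0' then ((PySem.List.len cs) - (i + 1)).toNat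
      else ((cs.drop (i + 1).toNat).countP (fun x => x == '0') : Nat) := by
  by_cases h : PySem.List.pyGetD cs i ' ' = '0'
  · simp [h, List.countP_true, PySem.List.length_pyRange_one]
  · simp only [List.any_cons, List.any_nil, Bool.or_false]
    have hmap := PySem.List.map_pyGetD_pyRange cs ' ' (a := i + 1) (by omega)
    have heq : (PySem.List.pyRange (i + 1) (PySem.List.len cs) 1).countP (fun j =>
        (PySem.List.pyGetD cs i ' ' == '0') || (PySem.List.pyGetD cs j ' ' == '0'))
        = (List.drop (i + 1).toNat cs).countP (fun x => x == '0') := by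
      rw [← hmap, List.countP_map]
      apply List.countP_congr
      intro j _
      simp [Function.comp, h]
    rw [heq, if_neg h]

-- the outer i-loop's sum of inner counts is pvPairCount
lemma pv_sum (cs : List Char) :
    ((PySem.List.pyRange 0 (PySem.List.len cs) 1).map (fun i =>
      (if PySem.List.pyGetD cs i ' ' = '0' then (((PySem.List.len cs) - (i + 1)).toNat : Int)
       else ((cs.drop (i + 1).toNat).countP (fun x => x == '0') : Nat)))).sum = pvPairCount cs := by
  induction cs with
  | nil => simp [PySem.List.len, PySem.List.pyRange_one_eq_nil, pvPairCount]
  | cons c t ih =>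
    have hn : PySem.List.len (c :: t) = (t.length : Int) + 1 := by
      simp [PySem.List.len]
    rw [PySem.List.pyRange_one_cons (by rw [hn]; omega)]
    simp only [List.map_cons, List.sum_cons, zero_add]
    have htail : ((PySem.List.pyRange 1 (PySem.List.len (c :: t)) 1).map (fun i =>
        (if PySem.List.pyGetD (c :: t) i ' ' = '0' then (((PySem.List.len (c :: t)) - (i + 1)).toNat : Int)
         else (((c :: t).drop (i + 1).toNat).countP (fun x => x == '0') : Nat)))).sum
        = ((PySem.List.pyRange 0 (PySem.List.len t) 1).map (fun i =>
        (if PySem.List.pyGetD t i ' ' = '0' then (((PySem.List.len t) - (i + 1)).toNat : Int)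
         else ((t.drop (i + 1).toNat).countP (fun x => x == '0') : Nat)))).sum := by
      rw [PySem.List.pyRange_one, PySem.List.pyRange_one, List.map_map, List.map_map]
      have hr : ((PySem.List.len (c :: t)) - 1).toNat = ((PySem.List.len t) - 0).toNat := by
        simp [PySem.List.len]
      rw [hr]
      congr 1
      apply List.map_congr_left
      intro k hk
      simp only [Function.comp]
      have h1 : (1 : Int) + (k : Int) = ((k + 1 : Nat) : Int) := by push_cast; ring
      have h2 : (0 : Int) + (k : Int) = ((k : Nat) : Int) := by norm_num
      rw [h1, h2, PySem.List.pyGetD_natCast, PySem.List.pyGetD_natCast]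
      have hget : (c :: t).getD (k + 1) ' ' = t.getD k ' ' := by simp
      have hdrop : ((((k + 1 : Nat) : Int)) + 1).toNat = k + 2 := by omega
      have hdrop2 : ((((k : Nat) : Int)) + 1).toNat = k + 1 := by omega
      rw [hget, hdrop, hdrop2]
      have hlen : ((PySem.List.len (c :: t)) - (((k + 1 : Nat) : Int) + 1)).toNat
          = ((PySem.List.len t) - (((k : Nat) : Int) + 1)).toNat := by
        simp [PySem.List.len]
      rw [hlen]
      rfl
    rw [htail, ih]
    have hhead : PySem.List.pyGetD (c :: t) 0 ' ' = c := PySem.List.pyGetD_zero_cons c t ' '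
    rw [hhead]
    show _ = pvPairCount (c :: t)
    rw [pvPairCount]
    congr 1
    by_cases hc : c = '0'
    · simp [hc]
    · simp [hc]

-- 2 · pvPairCount cs = n(n-1) - m(m-1)  with n = |cs|, m = n - (number of '0's)
lemma pv_two_mul (cs : List Char) :
    2 * pvPairCount cs
      = (cs.length : Int) * ((cs.length : Int) - 1)
        - ((cs.length : Int) - (cs.countP (fun c => c == '0') : Nat)) * (((cs.length : Int) - (cs.countP (fun c => c == '0') : Nat)) - 1) := by
  induction cs with
  | nil => simp [pvPairCount]
  | cons c t ih =>
    have hz : (t.countP (fun c => c == '0')) ≤ t.length := List.countP_le_length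
    rw [pvPairCount]
    by_cases hc : c = '0'
    · simp only [hc, List.countP_cons, List.length_cons, beq_self_eq_true, if_true]
      push_cast
      nlinarith [ih]
    · have hb : (c == '0') = false := by simp [hc]
      simp only [List.countP_cons, hb, List.length_cons, if_neg hc]
      push_cast
      nlinarith [ih, hz]

-- ===== VERDICT (by name: the statement is the Claim_ definition above) =====
theorem get_gap_score_x_spec : Claim_equal_get_gap_score_x := by
  intro s gap _
  unfold Spec_get_gap_score_x get_gap_score_x get_gap_score_x_alt
  simp only []
  have hlen : PySem.Str.len s = PySem.List.len s.toList := by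
    rw [PySem.Str.len_eq, PySem.List.len_eq]
  rw [hlen]
  -- A's nested loop ⇒ a sum of inner counts ⇒ pvPairCount
  simp only [PySem.List.foldl_if_add_one, PySem.List.foldl_add, zero_add]
  have hmapeq : ((PySem.List.pyRange 0 (PySem.List.len s.toList) 1).map (fun i =>
      ((PySem.List.pyRange (i + 1) (PySem.List.len s.toList) 1).countP (fun j =>
        [PySem.List.pyGetD s.toList i ' ', PySem.List.pyGetD s.toList j ' '].any (fun x => x == '0')) : Int)))
      = ((PySem.List.pyRange 0 (PySem.List.len s.toList) 1).map (fun i =>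
      (if PySem.List.pyGetD s.toList i ' ' = '0' then (((PySem.List.len s.toList) - (i + 1)).toNat : Int)
       else ((s.toList.drop (i + 1).toNat).countP (fun x => x == '0') : Nat)))) := by
    apply List.map_congr_left
    intro i hi
    exact (pv_inner s.toList i (PySem.List.mem_pyRange_one.mp hi).1).trans
      (apply_ite (fun x : Nat => (x : Int)) _ _ _)
  rw [hmapeq, pv_sum]
  -- B's closed form equals pvPairCount
  congr 1
  rw [PySem.Int.floordiv_eq_ediv_of_pos (by omega), PySem.Int.floordiv_eq_ediv_of_pos (by omega),
      PySem.List.len_eq]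
  set n : Int := (s.toList.length : Int) with hn
  set z : Int := ((s.toList.countP (fun c => c == '0') : Nat) : Int) with hzdef
  have h2 := pv_two_mul s.toList
  rw [← hn, ← hzdef] at h2
  obtain ⟨a, ha⟩ : Even (n * (n - 1)) := by
    have := Int.even_mul_succ_self (n - 1)
    simpa [mul_comm] using this
  obtain ⟨b, hb⟩ : Even ((n - z) * ((n - z) - 1)) := by
    have := Int.even_mul_succ_self ((n - z) - 1)
    simpa [mul_comm] using this
  omega
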